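-- pv_equiv track=rewrite | github.com/TessFerrandez/algorithms | graph/base-algorithms/without-cycles/get-longest-path.py | get_all_path_lengths
-- ===== SOURCE A (Python) =====
-- def get_all_path_lengths(graph, source, dest):
--     path_lenghts = []
--
--     def dfs(graph, source, dest, path_len):
--         if source == dest:
--             path_lenghts.append(path_len + 1)
--         else:
--             for neighbor in graph[source]:
--                 dfs(graph, neighbor, dest, path_len + 1)
--
--     dfs(graph, source, dest, 0)
--     return path_lenghts
-- ===== SOURCE B (Python) =====
-- def get_all_path_lengths(graph, source, dest):
--     # Iterative DFS with an explicit stack instead of recursion; return value only.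
--     result = []
--     stack = [(source, 0)]
--     while stack:
--         node, path_len = stack.pop()
--         if node == dest:
--             result.append(path_len + 1)
--         else:
--             for neighbor in reversed(graph[node]):
--                 stack.append((neighbor, path_len + 1))
--     return result
-- ===== Notes on version B (the rewrite author's own statement) =====
-- stated objective: alternative
-- what changed: Replaces A's recursive DFS with a mutated outer list by an iterative explicit-stack DFS (push reversed neighbours, pop LIFO) that builds the result in the same order.
import Mathlib
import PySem

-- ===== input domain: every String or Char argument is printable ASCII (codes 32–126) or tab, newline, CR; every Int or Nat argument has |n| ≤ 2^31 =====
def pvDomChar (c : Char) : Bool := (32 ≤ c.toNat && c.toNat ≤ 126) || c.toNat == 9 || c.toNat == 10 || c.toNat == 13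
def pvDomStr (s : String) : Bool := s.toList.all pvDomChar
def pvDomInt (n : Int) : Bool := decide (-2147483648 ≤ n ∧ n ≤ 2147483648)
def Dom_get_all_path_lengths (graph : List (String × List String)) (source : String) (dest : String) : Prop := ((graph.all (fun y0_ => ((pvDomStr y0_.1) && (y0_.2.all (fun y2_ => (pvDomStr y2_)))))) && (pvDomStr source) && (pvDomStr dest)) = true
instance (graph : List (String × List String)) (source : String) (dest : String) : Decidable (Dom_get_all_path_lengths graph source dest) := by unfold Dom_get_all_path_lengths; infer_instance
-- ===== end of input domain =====

-- B replaces A's nested recursive DFS by an explicit-stack iterative DFS (same output order); equivalence is about the return value only.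

-- shared helper: Python dict lookup graph[s] (first matching key; none = KeyError, excluded by Pre_)
def pvLookup (graph : List (String × List String)) (s : String) : Option (List String) :=
  graph.findSome? (fun p => if p.1 = s then some p.2 else none)

-- ===== PORT A =====
-- fuel bounds the recursion DEPTH only (transliteration guard for totality); under Pre_ the
-- depth is ≤ graph.length + 1, so fuel graph.length + 2 never runs out.
def dfsA (graph : List (String × List String)) (dest : String) : Nat → String → Int → List Int → List Int
  | 0, _, _, acc => acc
  | fuel + 1, source, path_len, acc =>
      if source = dest then acc ++ [path_len + 1]
      else
        match pvLookup graph source with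
        | none => acc  -- Python raises KeyError here; excluded by Pre_
        | some ns => ns.foldl (fun a nb => dfsA graph dest fuel nb (path_len + 1) a) acc

def get_all_path_lengths (graph : List (String × List String)) (source : String) (dest : String) : List Int :=
  dfsA graph dest (graph.length + 2) source 0 []

-- ===== PORT B =====
-- pvOk graph dest k s: "s is well-founded within depth k" — s is dest, or s is a key all of whose
-- successors are well-founded within depth k-1.  This is the exact condition under which Python A
-- (and Python B) return normally from s; it is used by Pre_ and by loopB's totality guard only.
def pvOk (graph : List (String × List String)) (dest : String) : Nat → String → Bool
  | 0, _ => false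
  | k + 1, s =>
      if s = dest then true
      else
        match pvLookup graph s with
        | none => false
        | some ns => ns.all (pvOk graph dest k)

-- least level at which pvOk holds (scanning below m; = minimal level if one exists below m)
def pvFirst (graph : List (String × List String)) (dest : String) (s : String) : Nat → Nat
  | 0 => 0
  | m + 1 => if pvOk graph dest m s then pvFirst graph dest s m else m + 1

def pvDepth (graph : List (String × List String)) (dest : String) (s : String) : Nat :=
  pvFirst graph dest s (graph.length + 2)

def pvBase (graph : List (String × List String)) : Nat :=
  (graph.map (fun p => p.2.length)).sum + 2

def pvWt (graph : List (String × List String)) (dest : String) (s : String) : Nat :=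
  pvBase graph ^ pvDepth graph dest s

def pvStackWt (graph : List (String × List String)) (dest : String) (stack : List (String × Int)) : Nat :=
  (stack.map (fun e => pvWt graph dest e.1)).sum

lemma pvBase_two (graph : List (String × List String)) : 2 ≤ pvBase graph := by
  unfold pvBase; omega

lemma pvWt_pos (graph : List (String × List String)) (dest : String) (s : String) :
    0 < pvWt graph dest s :=
  Nat.pow_pos (by have := pvBase_two graph; omega)

lemma pvOk_mono (graph : List (String × List String)) (dest : String) :
    ∀ k s, pvOk graph dest k s = true → pvOk graph dest (k + 1) s = true := by
  intro k
  induction k with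
  | zero => intro s h; simp [pvOk] at h
  | succ k ih =>
      intro s h
      rw [pvOk] at h ⊢
      by_cases hd : s = dest
      · simp [hd]
      · simp only [if_neg hd] at h ⊢
        cases hlk : pvLookup graph s with
        | none => rw [hlk] at h; simp at h
        | some ns =>
            rw [hlk] at h
            simp only [List.all_eq_true] at h ⊢
            exact fun nb hm => ih nb (h nb hm)

lemma pvOk_le (graph : List (String × List String)) (dest : String) {k m : Nat} (hkm : k ≤ m)
    {s : String} (h : pvOk graph dest k s = true) : pvOk graph dest m s = true := by
  induction hkm with
  | refl => exact h
  | step _ ih => exact pvOk_mono graph dest _ _ ih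

lemma pvOk_elim (graph : List (String × List String)) (dest : String) (k : Nat) (s : String)
    (h : pvOk graph dest (k + 1) s = true) (hsd : s ≠ dest) :
    ∃ ns, pvLookup graph s = some ns ∧ ∀ nb ∈ ns, pvOk graph dest k nb = true := by
  rw [pvOk, if_neg hsd] at h
  cases hlk : pvLookup graph s with
  | none => rw [hlk] at h; exact absurd h (by simp)
  | some ns =>
      rw [hlk] at h
      exact ⟨ns, rfl, by simpa [List.all_eq_true] using h⟩

lemma pvFirst_le (graph : List (String × List String)) (dest : String) (s : String) :
    ∀ m, pvFirst graph dest s m ≤ m := by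
  intro m
  induction m with
  | zero => simp [pvFirst]
  | succ m ih => rw [pvFirst]; split <;> omega

lemma pvFirst_min (graph : List (String × List String)) (dest : String) (s : String) :
    ∀ m j, j < m → pvOk graph dest j s = true → pvFirst graph dest s m ≤ j := by
  intro m
  induction m with
  | zero => omega
  | succ m ih =>
      intro j hj hok
      rw [pvFirst]
      by_cases hm : pvOk graph dest m s = true
      · rw [if_pos hm]
        rcases Nat.lt_succ_iff_lt_or_eq.mp hj with h | rfl
        · exact ih j h hok
        · exact pvFirst_le graph dest s _
      · exact absurd (pvOk_le graph dest (by omega) hok) hm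

lemma pvFirst_ok (graph : List (String × List String)) (dest : String) (s : String) :
    ∀ m, pvOk graph dest m s = true → pvOk graph dest (pvFirst graph dest s (m + 1)) s = true := by
  intro m
  induction m with
  | zero => intro h; simp [pvOk] at h
  | succ m ih =>
      intro h
      rw [pvFirst, if_pos h]
      by_cases hm : pvOk graph dest m s = true
      · exact ih hm
      · rw [pvFirst, if_neg hm]; exact h

lemma pvLookup_len_le (graph : List (String × List String)) (s : String) (ns : List String)
    (h : pvLookup graph s = some ns) : ns.length + 2 ≤ pvBase graph := by
  induction graph with
  | nil => simp [pvLookup] at h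
  | cons p rest ih =>
      unfold pvLookup at h
      rw [List.findSome?_cons] at h
      unfold pvBase
      by_cases hp : p.1 = s
      · simp [hp] at h
        subst h
        simp [List.map_cons, List.sum_cons]
      · simp [hp] at h
        have := ih h
        unfold pvBase at this
        simp only [List.map_cons, List.sum_cons]
        omega

-- each pushed neighbour weighs strictly less, and there are fewer than pvBase of them
lemma pvWt_push_lt (graph : List (String × List String)) (dest node : String)
    (hnd : node ≠ dest) (h : pvOk graph dest (graph.length + 1) node = true) :
    (((pvLookup graph node).getD []).map (fun nb => pvWt graph dest nb)).sum
      < pvWt graph dest node := by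
  have hd_ok : pvOk graph dest (pvDepth graph dest node) node = true :=
    pvFirst_ok graph dest node (graph.length + 1) h
  have hdle : pvDepth graph dest node ≤ graph.length + 2 := pvFirst_le graph dest node _
  obtain ⟨d', hd'⟩ : ∃ d', pvDepth graph dest node = d' + 1 := by
    cases hdd : pvDepth graph dest node with
    | zero => rw [hdd] at hd_ok; simp [pvOk] at hd_ok
    | succ d' => exact ⟨d', rfl⟩
  rw [hd'] at hd_ok
  obtain ⟨ns, hlk, hnb⟩ := pvOk_elim graph dest d' node hd_ok hnd
  rw [hlk]
  simp only [Option.getD_some]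
  have hB2 := pvBase_two graph
  set B := pvBase graph with hB
  have hub : ∀ x ∈ ns.map (fun nb => pvWt graph dest nb), x ≤ B ^ d' := by
    intro x hx
    obtain ⟨nb, hmem, rfl⟩ := List.mem_map.mp hx
    have hdep : pvDepth graph dest nb ≤ d' :=
      pvFirst_min graph dest nb (graph.length + 2) d' (by omega) (hnb nb hmem)
    exact Nat.pow_le_pow_right (by omega) hdep
  have hsum : (ns.map (fun nb => pvWt graph dest nb)).sum ≤ ns.length * B ^ d' := by
    have := List.sum_le_card_nsmul (ns.map (fun nb => pvWt graph dest nb)) (B ^ d') hub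
    simpa [smul_eq_mul, Nat.mul_comm] using this
  have hlen := pvLookup_len_le graph node ns hlk
  have hpow : 0 < B ^ d' := Nat.pow_pos (by omega)
  have : ns.length * B ^ d' < B * B ^ d' :=
    Nat.mul_lt_mul_of_lt_of_le (by omega) (le_refl _) hpow
  calc (ns.map (fun nb => pvWt graph dest nb)).sum ≤ ns.length * B ^ d' := hsum
    _ < B * B ^ d' := this
    _ = B ^ (d' + 1) := by rw [pow_succ, Nat.mul_comm]
    _ = pvWt graph dest node := by rw [pvWt, hd']

-- B's Python stack is modelled head-as-top: pop = head, pushing reversed(graph[node]) = prepending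
-- the neighbours in order.  The 'if h : pvOk …' test is a pure totality guard (it always holds
-- under Pre_); the measure pvStackWt decreases at every iteration.
def loopB (graph : List (String × List String)) (dest : String) :
    List (String × Int) → List Int → List Int
  | [], result => result
  | (node, path_len) :: rest, result =>
      if node = dest then loopB graph dest rest (result ++ [path_len + 1])
      else
        if h : pvOk graph dest (graph.length + 1) node = true then
          loopB graph dest
            (((pvLookup graph node).getD []).map (fun nb => (nb, path_len + 1)) ++ rest) result
        else loopB graph dest rest result  -- unreachable under Pre_ (totality guard)
  termination_by stack _ => pvStackWt graph dest stack
  decreasing_by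
  · unfold pvStackWt
    simp only [List.map_cons, List.sum_cons]
    have := pvWt_pos graph dest node
    omega
  · unfold pvStackWt
    simp only [List.map_append, List.sum_append, List.map_cons, List.sum_cons, List.map_map,
      Function.comp_def]
    have h2 := pvWt_push_lt graph dest node (by assumption) h
    omega
  · unfold pvStackWt
    simp only [List.map_cons, List.sum_cons]
    have := pvWt_pos graph dest node
    omega

def get_all_path_lengths_alt (graph : List (String × List String)) (source : String) (dest : String) : List Int :=
  loopB graph dest [(source, 0)] []

-- ===== PRECONDITION & SPEC =====
-- Pre_ holds exactly when Python A returns normally; excluded are exactly the inputs where A raises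
-- KeyError (a missing key reachable from source) or recurses forever (a cycle reachable from source).
-- 'A returns from s' is the least graph property satisfying
-- 's is dest, or a key whose successors all return'; it has no closed form over the raw lists; its standard characterisation is the finite fixpoint pvOk
-- (a node is well-founded iff it is dest, or a key all of whose successors are), which stabilises by
-- level graph.length + 1 because a repetition-free chain visits each key at most once.  pvOk is a
-- shape condition on (graph, dest, source) only — it computes no path lengths and is not the port's
-- recursion.
def Pre_get_all_path_lengths (graph : List (String × List String)) (source : String) (dest : String) : Prop :=
  pvOk graph dest (graph.length + 1) source = true

instance (graph : List (String × List String)) (source : String) (dest : String) : Decidable (Pre_get_all_path_lengths graph source dest) := by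
  unfold Pre_get_all_path_lengths; infer_instance

def pvWitness_get_all_path_lengths : (List (String × List String)) × String × String :=
  ([("a", ["b", "c"]), ("b", ["c"]), ("c", [])], "a", "c")

def Spec_get_all_path_lengths (graph : List (String × List String)) (source : String) (dest : String) (out : List Int) : Prop := out = get_all_path_lengths_alt graph source dest
instance (graph : List (String × List String)) (source : String) (dest : String) (out : List Int) : Decidable (Spec_get_all_path_lengths graph source dest out) := by unfold Spec_get_all_path_lengths; infer_instance

-- ===== CLAIM (what is proved, stated in full; the proofs are below) =====
def Claim_equal_get_all_path_lengths : Prop := ∀ (graph : List (String × List String)) (source : String) (dest : String), Dom_get_all_path_lengths graph source dest → Pre_get_all_path_lengths graph source dest → Spec_get_all_path_lengths graph source dest (get_all_path_lengths graph source dest)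

-- ===== LEMMAS AND PROOFS =====

lemma loopB_dest (graph : List (String × List String)) (dest : String) (p : Int)
    (rest : List (String × Int)) (res : List Int) :
    loopB graph dest ((dest, p) :: rest) res = loopB graph dest rest (res ++ [p + 1]) := by
  rw [loopB]; simp

lemma loopB_step (graph : List (String × List String)) (dest node : String) (p : Int)
    (ns : List String) (rest : List (String × Int)) (res : List Int)
    (hnd : node ≠ dest) (hok : pvOk graph dest (graph.length + 1) node = true)
    (hlk : pvLookup graph node = some ns) :
    loopB graph dest ((node, p) :: rest) res
      = loopB graph dest (ns.map (fun nb => (nb, p + 1)) ++ rest) res := by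
  rw [loopB]
  simp only [if_neg hnd, dif_pos hok, hlk, Option.getD_some]

-- the key bridge: processing one well-founded stack entry equals running A's dfs on it
lemma bridge (graph : List (String × List String)) (dest : String) :
    ∀ k, k ≤ graph.length + 1 → ∀ s, pvOk graph dest k s = true →
    ∀ (p : Int) (rest : List (String × Int)) (res : List Int) (fuel : Nat), k ≤ fuel →
    loopB graph dest ((s, p) :: rest) res = loopB graph dest rest (dfsA graph dest fuel s p res) := by
  intro k
  induction k with
  | zero => intro _ s h; simp [pvOk] at h
  | succ k ih =>
      intro hk s h p rest res fuel hf
      obtain ⟨f, rfl⟩ : ∃ f, fuel = f + 1 := ⟨fuel - 1, by omega⟩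
      by_cases hsd : s = dest
      · subst hsd; rw [loopB_dest, dfsA]; simp
      · obtain ⟨ns, hlk, hnb⟩ := pvOk_elim graph dest k s h hsd
        have hguard : pvOk graph dest (graph.length + 1) s = true := pvOk_le graph dest hk h
        rw [loopB_step graph dest s p ns rest res hsd hguard hlk]
        rw [dfsA]
        simp only [if_neg hsd, hlk]
        have inner : ∀ (l : List String), (∀ nb ∈ l, pvOk graph dest k nb = true) →
            ∀ (rest : List (String × Int)) (res : List Int),
            loopB graph dest (l.map (fun nb => (nb, p + 1)) ++ rest) res
              = loopB graph dest rest (l.foldl (fun a nb => dfsA graph dest f nb (p + 1) a) res) := by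
          intro l hl
          induction l with
          | nil => intro rest res; simp
          | cons a t iht =>
              intro rest res
              simp only [List.map_cons, List.cons_append, List.foldl_cons]
              rw [ih (by omega) a (hl a (by simp)) (p + 1) _ res f (by omega)]
              exact iht (fun nb hm => hl nb (by simp [hm])) rest _
        exact inner ns hnb rest res

-- ===== VERDICT (by name: the statement is the Claim_ definition above) =====
theorem get_all_path_lengths_spec : Claim_equal_get_all_path_lengths := by
  intro graph source dest _ hPre
  unfold Spec_get_all_path_lengths get_all_path_lengths get_all_path_lengths_alt
  rw [bridge graph dest (graph.length + 1) (le_refl _) source hPre 0 [] []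
      (graph.length + 2) (by omega)]
  rw [loopB]
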